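-- pv_equiv track=rewrite | github.com/dzyla/seq_align | app.py | report_mutations_from_alignment
-- ===== SOURCE A (Python) =====
-- def report_mutations_from_alignment(aligned_ref_str, aligned_query_str):
--     """ Reports mutations based on Biopython's aligned strings. Ref positions are ungapped. """
--     mutations_found = []
--     ref_ungapped_position_counter = 0
--     for i in range(len(aligned_ref_str)):
--         ref_char_at_pos = aligned_ref_str[i]
--         query_char_at_pos = aligned_query_str[i]
--
--         if ref_char_at_pos != '-':
--             ref_ungapped_position_counter += 1
--
--         if ref_char_at_pos != query_char_at_pos:
--             if ref_char_at_pos != '-' and query_char_at_pos != '-':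
--                 mutations_found.append(f"{ref_char_at_pos}{ref_ungapped_position_counter}{query_char_at_pos}")
--     return mutations_found
-- ===== SOURCE B (Python) =====
-- def report_mutations_from_alignment(aligned_ref_str, aligned_query_str):
--     """ Reports mutations based on Biopython's aligned strings. Ref positions are ungapped. """
--     # Pass 1: prefix table of ungapped reference positions.
--     positions = []
--     total = 0
--     for c in aligned_ref_str:
--         total += (c != '-')
--         positions.append(total)
--     # Pass 2: emit substitutions (indexing both strings so a short query still raises).
--     return [
--         f"{aligned_ref_str[i]}{positions[i]}{aligned_query_str[i]}"
--         for i in range(len(aligned_ref_str))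
--         if aligned_ref_str[i] != aligned_query_str[i]
--         and aligned_ref_str[i] != '-' and aligned_query_str[i] != '-'
--     ]
-- ===== Notes on version B (the rewrite author's own statement) =====
-- stated objective: alternative
-- what changed: Replaces A's single interleaved loop carrying a running counter with two separate passes: first a prefix table of ungapped reference positions, then a list comprehension over indices that emits the substitution strings.
import Mathlib
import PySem

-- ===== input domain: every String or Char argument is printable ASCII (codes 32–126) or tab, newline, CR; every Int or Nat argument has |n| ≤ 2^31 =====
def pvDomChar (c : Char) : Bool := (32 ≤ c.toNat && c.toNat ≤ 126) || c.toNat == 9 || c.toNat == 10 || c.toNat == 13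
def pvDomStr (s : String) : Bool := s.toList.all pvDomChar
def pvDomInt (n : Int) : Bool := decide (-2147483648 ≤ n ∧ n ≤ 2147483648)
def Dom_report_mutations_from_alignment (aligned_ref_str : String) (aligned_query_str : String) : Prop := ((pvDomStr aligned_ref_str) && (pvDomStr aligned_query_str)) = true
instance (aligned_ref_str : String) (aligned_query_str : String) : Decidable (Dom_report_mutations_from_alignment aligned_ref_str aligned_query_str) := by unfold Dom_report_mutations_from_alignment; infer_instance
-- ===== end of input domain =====

-- B replaces A's single interleaved counter loop with two passes (a prefix table of
-- ungapped positions, then an index comprehension); objective: alternative decomposition.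
-- Both raise IndexError when the query is shorter than the reference (excluded by Pre_).

-- ===== PORT A =====
-- A's loop: state = (mutations_found, ref_ungapped_position_counter).
-- aligned_query_str[i] raises IndexError when i ≥ len(query); Pre_ excludes that,
-- so the getD default is never consulted on admitted inputs.
def report_mutations_from_alignment (aligned_ref_str : String) (aligned_query_str : String) : List String :=
  let r := aligned_ref_str.toList
  let q := aligned_query_str.toList
  ((List.range r.length).foldl (fun (st : List String × Int) i =>
      let rc := r.getD i ' '
      let qc := q.getD i ' '
      let cnt := if rc ≠ '-' then st.2 + 1 else st.2
      if rc ≠ qc then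
        if rc ≠ '-' ∧ qc ≠ '-' then
          (st.1 ++ [String.ofList ([rc] ++ (PySem.Int.toStr cnt).toList ++ [qc])], cnt)
        else (st.1, cnt)
      else (st.1, cnt)) (([] : List String), (0 : Int))).1

-- ===== PORT B =====
-- Pass 1 of Source B: running prefix sums of (c != '-') over the reference.
def pvPrefixPositions (total : Int) : List Char → List Int
  | [] => []
  | c :: cs =>
      let t := total + (if c ≠ '-' then 1 else 0)
      t :: pvPrefixPositions t cs

def report_mutations_from_alignment_alt (aligned_ref_str : String) (aligned_query_str : String) : List String :=
  let r := aligned_ref_str.toList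
  let q := aligned_query_str.toList
  let positions := pvPrefixPositions 0 r
  (List.range r.length).filterMap (fun i =>
    let rc := r.getD i ' '
    let qc := q.getD i ' '
    if rc ≠ qc ∧ rc ≠ '-' ∧ qc ≠ '-' then
      some (String.ofList ([rc] ++ (PySem.Int.toStr (positions.getD i 0)).toList ++ [qc]))
    else none)

-- ===== PRECONDITION & SPEC =====
-- Pre_ excludes exactly the inputs where the Python A raises IndexError:
-- aligned_query_str[i] with len(query) < len(ref).
def Pre_report_mutations_from_alignment (aligned_ref_str : String) (aligned_query_str : String) : Prop :=
  aligned_ref_str.toList.length ≤ aligned_query_str.toList.length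
instance (aligned_ref_str : String) (aligned_query_str : String) : Decidable (Pre_report_mutations_from_alignment aligned_ref_str aligned_query_str) := by unfold Pre_report_mutations_from_alignment; infer_instance

def pvWitness_report_mutations_from_alignment : String × String := ("AC-GT", "AT-GA")

def Spec_report_mutations_from_alignment (aligned_ref_str : String) (aligned_query_str : String) (out : List String) : Prop := out = report_mutations_from_alignment_alt aligned_ref_str aligned_query_str
instance (aligned_ref_str : String) (aligned_query_str : String) (out : List String) : Decidable (Spec_report_mutations_from_alignment aligned_ref_str aligned_query_str out) := by unfold Spec_report_mutations_from_alignment; infer_instance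

-- ===== CLAIM (what is proved, stated in full; the proofs are below) =====
def Claim_equal_report_mutations_from_alignment : Prop := ∀ (aligned_ref_str : String) (aligned_query_str : String), Dom_report_mutations_from_alignment aligned_ref_str aligned_query_str → Pre_report_mutations_from_alignment aligned_ref_str aligned_query_str → Spec_report_mutations_from_alignment aligned_ref_str aligned_query_str (report_mutations_from_alignment aligned_ref_str aligned_query_str)

-- ===== LEMMAS AND PROOFS =====

-- the per-character increment of A's counter / B's prefix sums
def pvFlag (c : Char) : Int := if c ≠ '-' then 1 else 0

lemma pvPrefixPositions_getD (xs : List Char) (c : Int) (i : Nat) (h : i < xs.length) :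
    (pvPrefixPositions c xs).getD i 0 = c + ((xs.take (i + 1)).map pvFlag).sum := by
  induction xs generalizing c i with
  | nil => simp at h
  | cons x xs ih =>
      cases i with
      | zero => simp [pvPrefixPositions, pvFlag]
      | succ n =>
          simp only [pvPrefixPositions, List.getD_cons_succ, List.take_succ_cons,
            List.map_cons, List.sum_cons]
          rw [ih _ n (by simpa using h)]
          ring_nf
          simp [pvFlag]
          ring

lemma pvMainInv (r q : List Char) (n : Nat) (hn : n ≤ r.length) :
    (List.range n).foldl (fun (st : List String × Int) i =>
      let rc := r.getD i ' '
      let qc := q.getD i ' '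
      let cnt := if rc ≠ '-' then st.2 + 1 else st.2
      if rc ≠ qc then
        if rc ≠ '-' ∧ qc ≠ '-' then
          (st.1 ++ [String.ofList ([rc] ++ (PySem.Int.toStr cnt).toList ++ [qc])], cnt)
        else (st.1, cnt)
      else (st.1, cnt)) (([] : List String), (0 : Int))
    = ((List.range n).filterMap (fun i =>
        let rc := r.getD i ' '
        let qc := q.getD i ' '
        if rc ≠ qc ∧ rc ≠ '-' ∧ qc ≠ '-' then
          some (String.ofList ([rc] ++ (PySem.Int.toStr ((pvPrefixPositions 0 r).getD i 0)).toList ++ [qc]))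
        else none),
       ((r.take n).map pvFlag).sum) := by
  induction n with
  | zero => simp
  | succ n ih =>
      have hlt : n < r.length := hn
      rw [List.range_succ, List.foldl_append, List.filterMap_append, ih (Nat.le_of_succ_le hn)]
      have hpos : (pvPrefixPositions 0 r).getD n 0 = ((List.map pvFlag r).take (n + 1)).sum := by
        rw [pvPrefixPositions_getD r 0 n hlt, List.map_take]; ring
      have htake : ((List.map pvFlag r).take (n + 1)).sum
          = ((List.map pvFlag r).take n).sum + pvFlag (r.getD n ' ') := by
        rw [← List.map_take, List.take_add_one, List.map_append, List.sum_append,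
          List.getD_eq_getElem r ' ' hlt, List.map_take]
        simp [hlt]
      simp only [List.foldl_cons, List.foldl_nil, List.filterMap_cons, List.filterMap_nil]
      by_cases hq : r.getD n ' ' = q.getD n ' ' <;>
        by_cases h1 : r.getD n ' ' = '-' <;>
          by_cases h2 : q.getD n ' ' = '-' <;>
            simp only [List.getD_eq_getElem?_getD] at hq h1 h2 hpos htake ⊢ <;>
              simp [hq, h1, h2, hpos, htake, pvFlag, Prod.ext_iff, Nat.add_comm, Int.add_comm]

-- ===== VERDICT (by name: the statement is the Claim_ definition above) =====
theorem report_mutations_from_alignment_spec : Claim_equal_report_mutations_from_alignment := by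
  intro rs qs _ _
  unfold Spec_report_mutations_from_alignment
  exact congrArg Prod.fst (pvMainInv rs.toList qs.toList rs.toList.length (le_refl _))
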